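-- pv_equiv track=rewrite | github.com/pgalari/api-moon-ami | lunar_api.py | get_moon_phase_text
-- ===== SOURCE A (Python) =====
-- def get_moon_phase_text(lunar_phase, hemisphere):
--     if hemisphere == 'north':
--         phases = [
--             (0, 'Luna Nueva'),
--             (45, 'Luna Creciente'),
--             (90, 'Cuarto Creciente'),
--             (135, 'Gibosa Creciente'),
--             (180, 'Luna Llena'),
--             (225, 'Gibosa Menguante'),
--             (270, 'Cuarto Menguante'),
--             (315, 'Luna Menguante'),
--             (360, 'Luna Nueva')
--         ]
--     else:
--         phases = [
--             (0, 'Luna Nueva'),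
--             (45, 'Luna Menguante'),
--             (90, 'Cuarto Menguante'),
--             (135, 'Gibosa Menguante'),
--             (180, 'Luna Llena'),
--             (225, 'Gibosa Creciente'),
--             (270, 'Cuarto Creciente'),
--             (315, 'Luna Creciente'),
--             (360, 'Luna Nueva')
--         ]
--
--     for angle, phase in phases:
--         if lunar_phase < angle:
--             return phase
--     return 'Desconocida'
-- ===== SOURCE B (Python) =====
-- NORTH = ['Luna Nueva', 'Luna Creciente', 'Cuarto Creciente', 'Gibosa Creciente',
--          'Luna Llena', 'Gibosa Menguante', 'Cuarto Menguante', 'Luna Menguante',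
--          'Luna Nueva']
-- SOUTH = ['Luna Nueva', 'Luna Menguante', 'Cuarto Menguante', 'Gibosa Menguante',
--          'Luna Llena', 'Gibosa Creciente', 'Cuarto Creciente', 'Luna Creciente',
--          'Luna Nueva']
--
-- def get_moon_phase_text(lunar_phase, hemisphere):
--     if lunar_phase < 0:
--         return 'Luna Nueva'
--     if lunar_phase >= 360:
--         return 'Desconocida'
--     names = NORTH if hemisphere == 'north' else SOUTH
--     return names[lunar_phase // 45 + 1]
-- ===== Notes on version B (the rewrite author's own statement) =====
-- stated objective: simpler
-- what changed: Replaced the linear scan over (angle, name) boundary pairs by a closed-form bucket lookup: index = lunar_phase // 45 + 1 into a name list per hemisphere, with explicit cases for negative input and >= 360.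
import Mathlib
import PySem

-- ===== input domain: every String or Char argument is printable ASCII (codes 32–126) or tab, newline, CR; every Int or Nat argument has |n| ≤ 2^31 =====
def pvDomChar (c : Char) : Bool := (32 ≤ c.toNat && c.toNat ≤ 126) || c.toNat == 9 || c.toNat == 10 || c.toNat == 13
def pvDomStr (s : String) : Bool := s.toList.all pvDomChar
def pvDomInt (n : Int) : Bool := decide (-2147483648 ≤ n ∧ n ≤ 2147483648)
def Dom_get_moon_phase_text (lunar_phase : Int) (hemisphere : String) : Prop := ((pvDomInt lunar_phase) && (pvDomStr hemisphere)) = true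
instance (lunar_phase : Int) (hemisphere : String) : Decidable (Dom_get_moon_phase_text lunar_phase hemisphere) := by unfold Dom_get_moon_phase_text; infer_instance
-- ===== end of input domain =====

-- B replaces A's linear scan over (angle, name) pairs by a closed-form bucket lookup
-- (index = lunar_phase // 45 + 1 into a per-hemisphere name list); objective: simpler.


-- ===== PORT A =====
-- 'for angle, phase in phases: if lunar_phase < angle: return phase' / 'return "Desconocida"'
def phaseScan (phases : List (Int × String)) (lunar_phase : Int) : String :=
  match phases with
  | [] => "Desconocida"
  | (angle, phase) :: rest =>
      if lunar_phase < angle then phase else phaseScan rest lunar_phase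

def get_moon_phase_text (lunar_phase : Int) (hemisphere : String) : String :=
  let phases : List (Int × String) :=
    if hemisphere == "north" then
      [(0, "Luna Nueva"), (45, "Luna Creciente"), (90, "Cuarto Creciente"),
       (135, "Gibosa Creciente"), (180, "Luna Llena"), (225, "Gibosa Menguante"),
       (270, "Cuarto Menguante"), (315, "Luna Menguante"), (360, "Luna Nueva")]
    else
      [(0, "Luna Nueva"), (45, "Luna Menguante"), (90, "Cuarto Menguante"),
       (135, "Gibosa Menguante"), (180, "Luna Llena"), (225, "Gibosa Creciente"),
       (270, "Cuarto Creciente"), (315, "Luna Creciente"), (360, "Luna Nueva")]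
  phaseScan phases lunar_phase

-- ===== PORT B =====
def pvNorth : List String :=
  ["Luna Nueva", "Luna Creciente", "Cuarto Creciente", "Gibosa Creciente",
   "Luna Llena", "Gibosa Menguante", "Cuarto Menguante", "Luna Menguante",
   "Luna Nueva"]

def pvSouth : List String :=
  ["Luna Nueva", "Luna Menguante", "Cuarto Menguante", "Gibosa Menguante",
   "Luna Llena", "Gibosa Creciente", "Cuarto Creciente", "Luna Creciente",
   "Luna Nueva"]

def get_moon_phase_text_alt (lunar_phase : Int) (hemisphere : String) : String :=
  if lunar_phase < 0 then "Luna Nueva"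
  else if 360 ≤ lunar_phase then "Desconocida"
  else
    let names := if hemisphere == "north" then pvNorth else pvSouth
    -- names[lunar_phase // 45 + 1]; the index is in range here, so getD never fires
    (PySem.List.pyGet? names (PySem.Int.floordiv lunar_phase 45 + 1)).getD ""

-- ===== PRECONDITION & SPEC =====
def Spec_get_moon_phase_text (lunar_phase : Int) (hemisphere : String) (out : String) : Prop := out = get_moon_phase_text_alt lunar_phase hemisphere
instance (lunar_phase : Int) (hemisphere : String) (out : String) : Decidable (Spec_get_moon_phase_text lunar_phase hemisphere out) := by unfold Spec_get_moon_phase_text; infer_instance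

-- ===== CLAIM (what is proved, stated in full; the proofs are below) =====
def Claim_equal_get_moon_phase_text : Prop := ∀ (lunar_phase : Int) (hemisphere : String), Dom_get_moon_phase_text lunar_phase hemisphere → Spec_get_moon_phase_text lunar_phase hemisphere (get_moon_phase_text lunar_phase hemisphere)

-- ===== LEMMAS AND PROOFS =====

-- ===== VERDICT (by name: the statement is the Claim_ definition above) =====
theorem get_moon_phase_text_spec : Claim_equal_get_moon_phase_text := by
  intro lp h _
  unfold Spec_get_moon_phase_text get_moon_phase_text get_moon_phase_text_alt
  by_cases hn : (h == "north") = true <;>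
    simp only [hn, if_true, if_false, Bool.false_eq_true, phaseScan] <;>
    split_ifs <;>
    first
      | rfl
      | omega
      | (rw [show PySem.Int.floordiv lp 45 = 0 from by
           rw [PySem.Int.floordiv_eq_iff_of_pos (by norm_num)]; omega]; rfl)
      | (rw [show PySem.Int.floordiv lp 45 = 1 from by
           rw [PySem.Int.floordiv_eq_iff_of_pos (by norm_num)]; omega]; rfl)
      | (rw [show PySem.Int.floordiv lp 45 = 2 from by
           rw [PySem.Int.floordiv_eq_iff_of_pos (by norm_num)]; omega]; rfl)
      | (rw [show PySem.Int.floordiv lp 45 = 3 from by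
           rw [PySem.Int.floordiv_eq_iff_of_pos (by norm_num)]; omega]; rfl)
      | (rw [show PySem.Int.floordiv lp 45 = 4 from by
           rw [PySem.Int.floordiv_eq_iff_of_pos (by norm_num)]; omega]; rfl)
      | (rw [show PySem.Int.floordiv lp 45 = 5 from by
           rw [PySem.Int.floordiv_eq_iff_of_pos (by norm_num)]; omega]; rfl)
      | (rw [show PySem.Int.floordiv lp 45 = 6 from by
           rw [PySem.Int.floordiv_eq_iff_of_pos (by norm_num)]; omega]; rfl)
      | (rw [show PySem.Int.floordiv lp 45 = 7 from by
           rw [PySem.Int.floordiv_eq_iff_of_pos (by norm_num)]; omega]; rfl)
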